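-- pv_equiv track=rewrite | github.com/BhanukaUOM/Project-Euler-Solutions | src/Project Euler #19: Counting Sundays.py | getDays
-- ===== SOURCE A (Python) =====
-- def leap(year):
--     if year%400 == 0:
--         return True;
--     elif year%100 == 0:
--         return False
--     elif year%4 == 0:
--         return True
--     else:
--         return False
--
-- ms = [0, 31, 28, 31, 30, 31, 30, 31, 31, 30, 31, 30, 31]
--
-- def days(y, m):
--     if m == 2 and leap(y):
--         return 29;
--     else:
--         return ms[m];
--
-- def getDays(y, m):
--     rem = y-1
--     yls = rem//400 + rem//4 - rem//100
--     ans = yls+rem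
--
--     p = 1
--     while p<m:
--         ans += days(y, p)
--         p+=1
--     return ans%7;
-- ===== SOURCE B (Python) =====
-- # Cumulative days before month m in a non-leap year (index m; index 13 = whole year),
-- # replacing A's month-by-month accumulation loop with one table lookup + leap correction.
-- CUM = [0, 0, 31, 59, 90, 120, 151, 181, 212, 243, 273, 304, 334, 365]
--
-- def getDays(y, m):
--     rem = y - 1
--     yls = rem//400 + rem//4 - rem//100
--     extra = CUM[m] if m >= 2 else 0
--     if m > 2 and ((y % 4 == 0 and y % 100 != 0) or y % 400 == 0):
--         extra += 1
--     return (yls + rem + extra) % 7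
-- ===== Notes on version B (the rewrite author's own statement) =====
-- stated objective: faster
-- what changed: Replaces the per-month while-loop accumulation (with a days/leap helper per month) by a single precomputed cumulative-days table lookup plus one leap-year correction for m > 2.
import Mathlib
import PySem

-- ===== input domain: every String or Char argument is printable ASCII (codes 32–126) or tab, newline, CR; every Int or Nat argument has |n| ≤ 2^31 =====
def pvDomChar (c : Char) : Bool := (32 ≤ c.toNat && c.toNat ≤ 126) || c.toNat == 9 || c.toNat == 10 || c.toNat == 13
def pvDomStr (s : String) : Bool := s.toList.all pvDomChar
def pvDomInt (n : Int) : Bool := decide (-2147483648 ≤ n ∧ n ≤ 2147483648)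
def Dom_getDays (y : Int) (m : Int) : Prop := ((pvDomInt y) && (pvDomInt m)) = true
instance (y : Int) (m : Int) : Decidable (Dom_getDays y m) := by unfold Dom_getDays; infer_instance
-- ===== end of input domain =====

-- B replaces A's month-by-month accumulation loop with a cumulative-days table lookup
-- plus one leap correction; return values proved equal for all m ≤ 13 (both raise for m ≥ 14).

-- ===== PORT A =====
def leapA (year : Int) : Bool :=
  if PySem.Int.mod year 400 = 0 then true
  else if PySem.Int.mod year 100 = 0 then false
  else if PySem.Int.mod year 4 = 0 then true
  else false

def msA : List Int := [0, 31, 28, 31, 30, 31, 30, 31, 31, 30, 31, 30, 31]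

def daysA (y : Int) (m : Int) : Int :=
  if m = 2 ∧ leapA y then 29 else (PySem.List.pyGet? msA m).getD 0

def loopA (y : Int) (m : Int) (p : Int) (ans : Int) : Int :=
  if _h : p < m then loopA y m (p + 1) (ans + daysA y p) else ans
termination_by (m - p).toNat
decreasing_by omega

def getDays (y : Int) (m : Int) : Int :=
  let rem := y - 1
  let yls := PySem.Int.floordiv rem 400 + PySem.Int.floordiv rem 4 - PySem.Int.floordiv rem 100
  PySem.Int.mod (loopA y m 1 (yls + rem)) 7

-- ===== PORT B =====
def cumB : List Int := [0, 0, 31, 59, 90, 120, 151, 181, 212, 243, 273, 304, 334, 365]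

def leapB (y : Int) : Bool :=
  (PySem.Int.mod y 4 = 0 ∧ PySem.Int.mod y 100 ≠ 0) ∨ PySem.Int.mod y 400 = 0

def getDays_alt (y : Int) (m : Int) : Int :=
  let rem := y - 1
  let yls := PySem.Int.floordiv rem 400 + PySem.Int.floordiv rem 4 - PySem.Int.floordiv rem 100
  let extra : Int := if 2 ≤ m then (PySem.List.pyGet? cumB m).getD 0 else 0
  let extra := if 2 < m ∧ leapB y then extra + 1 else extra
  PySem.Int.mod (yls + rem + extra) 7

-- ===== PRECONDITION & SPEC =====
-- Pre_ excludes m ≥ 14, where the Python A raises IndexError (ms has indices 0..12).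
def Pre_getDays (y : Int) (m : Int) : Prop := m ≤ 13
instance (y : Int) (m : Int) : Decidable (Pre_getDays y m) := by unfold Pre_getDays; infer_instance
def pvWitness_getDays : Int × Int := (1900, 3)

def Spec_getDays (y : Int) (m : Int) (out : Int) : Prop := out = getDays_alt y m
instance (y : Int) (m : Int) (out : Int) : Decidable (Spec_getDays y m out) := by unfold Spec_getDays; infer_instance

-- ===== CLAIM (what is proved, stated in full; the proofs are below) =====
def Claim_equal_getDays : Prop := ∀ (y : Int) (m : Int), Dom_getDays y m → Pre_getDays y m → Spec_getDays y m (getDays y m)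

-- ===== LEMMAS AND PROOFS =====

theorem leapA_eq_leapB (y : Int) : leapA y = leapB y := by
  have h4 := PySem.Int.floordiv_mul_add_mod y 4
  have h100 := PySem.Int.floordiv_mul_add_mod y 100
  have h400 := PySem.Int.floordiv_mul_add_mod y 400
  unfold leapA leapB
  split_ifs with h1 h2 h3 <;> simp_all

theorem loopA_stop (y m p ans : Int) (h : ¬ p < m) : loopA y m p ans = ans := by
  rw [loopA]; simp [h]

theorem loopA_step (y m p ans : Int) (h : p < m) :
    loopA y m p ans = loopA y m (p + 1) (ans + daysA y p) := by
  rw [loopA]; simp [h]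

theorem getDays_spec_aux (y m : Int) (hm : m ≤ 13) : getDays y m = getDays_alt y m := by
  unfold getDays getDays_alt
  by_cases h1 : m ≤ 1
  · simp [loopA_stop y m 1 _ (by omega), show ¬ (2 ≤ m) from by omega,
      show ¬ (2 < m) from by omega]
  · -- 2 ≤ m ≤ 13: finitely many cases; unfold the loop fully in each
    have hA := leapA_eq_leapB y
    interval_cases m <;> cases hb : leapB y <;>
      simp [loopA_step, loopA_stop, daysA, hA, hb, msA, cumB,
        PySem.List.pyGet?, PySem.List.pyIdx?] <;> omega

-- ===== VERDICT (by name: the statement is the Claim_ definition above) =====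
theorem getDays_spec : Claim_equal_getDays := by
  intro y m _ hpre
  exact getDays_spec_aux y m hpre
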